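-- pv_equiv track=rewrite | github.com/2021533097/try2 | 快速幂.py | len_ex
-- ===== SOURCE A (Python) =====
-- def len_ex(int_ex):
--     a = []
--     count = 0
--     while (int_ex >= 1):
--         c = int_ex % 2
--         int_ex = int_ex // 2
--         count += 1
--         a.append(c)
--     return count, a
-- ===== SOURCE B (Python) =====
-- def len_ex(int_ex):
--     count = int_ex.bit_length() if int_ex >= 1 else 0
--     a = [(int_ex >> i) & 1 for i in range(count)]
--     return count, a
-- ===== Notes on version B (the rewrite author's own statement) =====
-- stated objective: idiomatic
-- what changed: Replaced the divide-and-accumulate while loop with a closed-form bit_length count plus index-based shift-and-mask extraction of each bit.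
import Mathlib
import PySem

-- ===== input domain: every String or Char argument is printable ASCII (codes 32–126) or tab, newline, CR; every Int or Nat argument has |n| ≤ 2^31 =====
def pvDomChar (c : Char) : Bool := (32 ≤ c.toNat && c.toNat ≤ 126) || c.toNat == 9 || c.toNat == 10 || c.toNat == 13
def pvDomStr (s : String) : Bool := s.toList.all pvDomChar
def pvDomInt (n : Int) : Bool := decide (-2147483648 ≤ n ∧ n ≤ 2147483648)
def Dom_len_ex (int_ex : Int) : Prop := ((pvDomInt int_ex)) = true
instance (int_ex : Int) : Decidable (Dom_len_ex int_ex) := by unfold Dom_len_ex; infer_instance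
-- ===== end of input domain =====

-- B replaces A's divide-and-accumulate while loop by a closed-form bit_length count
-- plus per-index shift-and-mask bit extraction (idiomatic, same asymptotic cost).


-- ===== PORT A =====
-- the while loop of A, with its accumulators a and count
def lenExLoop (int_ex : Int) (a : List Int) (count : Int) : Int × List Int :=
  if h : 1 ≤ int_ex then
    lenExLoop (PySem.Int.floordiv int_ex 2) (a ++ [PySem.Int.mod int_ex 2]) (count + 1)
  else
    (count, a)
termination_by int_ex.toNat
decreasing_by
  rw [PySem.Int.floordiv_eq_ediv_of_pos (by omega)]
  omega

def len_ex (int_ex : Int) : Int × List Int :=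
  lenExLoop int_ex [] 0

-- ===== PORT B =====
def len_ex_alt (int_ex : Int) : Int × List Int :=
  let count : Int := if 1 ≤ int_ex then (PySem.Int.bitLength int_ex : Int) else 0
  (count, (PySem.List.pyRange 0 count 1).map (fun i => PySem.Int.band (int_ex >>> i.toNat) 1))

-- ===== PRECONDITION & SPEC =====
def Spec_len_ex (int_ex : Int) (out : Int × List Int) : Prop := out = len_ex_alt int_ex
instance (int_ex : Int) (out : Int × List Int) : Decidable (Spec_len_ex int_ex out) := by unfold Spec_len_ex; infer_instance

-- ===== CLAIM (what is proved, stated in full; the proofs are below) =====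
def Claim_equal_len_ex : Prop := ∀ (int_ex : Int), Dom_len_ex int_ex → Spec_len_ex int_ex (len_ex int_ex)

-- ===== LEMMAS AND PROOFS =====

-- the bit list B produces, as a function of n (B's count and B's map)
def altBits (n : Int) : List Int :=
  (PySem.List.pyRange 0 (if 1 ≤ n then (PySem.Int.bitLength n : Int) else 0) 1).map
    (fun i => PySem.Int.band (n >>> i.toNat) 1)

theorem altBits_of_not_pos (n : Int) (h : ¬ 1 ≤ n) : altBits n = [] := by
  simp [altBits, h, PySem.List.pyRange_one_eq_nil (by omega : (0:Int) ≥ 0)]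

theorem shift_cast (m j : Nat) : ((m : Int) >>> ((j : Nat) : Int)) = ((m >>> j : Nat) : Int) := by
  simp [Int.shiftRight_eq_div_pow]

theorem shift_succ (m k : Nat) : m >>> (k + 1) = (m / 2) >>> k := by
  simp [Nat.shiftRight_eq_div_pow, Nat.div_div_eq_div_mul, pow_succ, Nat.mul_comm]

theorem altBits_of_pos (n : Int) (h : 1 ≤ n) :
    altBits n = PySem.Int.mod n 2 :: altBits (PySem.Int.floordiv n 2) := by
  obtain ⟨m, rfl⟩ : ∃ m : Nat, n = (m : Int) := ⟨n.toNat, by omega⟩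
  have hm : 0 < m := by exact_mod_cast h
  have hbl : 0 < PySem.Int.bitLength (m : Int) := by
    rw [PySem.Int.bitLength_natCast hm]; omega
  have hfd : PySem.Int.floordiv (m : Int) 2 = ((m / 2 : Nat) : Int) :=
    PySem.Int.floordiv_natCast m 2
  unfold altBits
  rw [hfd, if_pos h, PySem.List.pyRange_one_cons (by exact_mod_cast hbl),
      PySem.List.pyRange_one, List.map_cons]
  refine List.cons_eq_cons.mpr ⟨?_, ?_⟩
  · rw [PySem.Int.band_one, show ((Int.toNat 0 : Nat) : Int) = (((0:Nat)):Int) from rfl,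
        shift_cast]
    simp
  · by_cases h2 : 1 ≤ ((m / 2 : Nat) : Int)
    · rw [if_pos h2, PySem.List.pyRange_one]
      have hlen : ((PySem.Int.bitLength ((m : Nat) : Int) : Int) - (0 + 1)).toNat
          = (((PySem.Int.bitLength ((m / 2 : Nat) : Int) : Nat) : Int) - 0).toNat := by
        rw [PySem.Int.bitLength_natCast hm]; omega
      rw [hlen, List.map_map, List.map_map]
      refine List.map_congr_left (fun k _ => ?_)
      simp only [Function.comp]
      have h1 : ((0 : Int) + 1 + (k : Int)).toNat = k + 1 := by omega
      have h0 : ((0 : Int) + (k : Int)).toNat = k := by omega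
      rw [h1, h0]
      congr 1
      rw [shift_cast m (k + 1), shift_cast (m / 2) k, shift_succ]
    · -- m / 2 = 0, i.e. m = 1: both tails are empty
      have hm1 : m = 1 := by omega
      subst hm1
      rw [if_neg h2, PySem.List.pyRange_one_eq_nil (by omega)]
      have hb1 : PySem.Int.bitLength ((1 : Nat) : Int) = 1 := by decide
      rw [hb1]
      norm_num

theorem lenExLoop_eq (n : Int) (a : List Int) (count : Int) :
    lenExLoop n a count
      = (count + (if 1 ≤ n then (PySem.Int.bitLength n : Int) else 0), a ++ altBits n) := by
  by_cases h : 1 ≤ n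
  · rw [lenExLoop, dif_pos h,
        lenExLoop_eq (PySem.Int.floordiv n 2) (a ++ [PySem.Int.mod n 2]) (count + 1),
        altBits_of_pos n h]
    have hbl : PySem.Int.bitLength n = PySem.Int.bitLength (PySem.Int.floordiv n 2) + 1 :=
      PySem.Int.bitLength_of_pos (by omega)
    rw [Prod.mk.injEq]
    refine ⟨?_, ?_⟩
    · rw [if_pos h, hbl]
      by_cases h2 : 1 ≤ PySem.Int.floordiv n 2
      · rw [if_pos h2]; push_cast; ring
      · rw [if_neg h2]
        have : PySem.Int.floordiv n 2 = 0 := by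
          rw [PySem.Int.floordiv_eq_ediv_of_pos (by omega)] at h2 ⊢; omega
        rw [this]
        simp [PySem.Int.bitLength]
    · simp
  · rw [lenExLoop, dif_neg h, altBits_of_not_pos n h]
    simp [h]
termination_by n.toNat
decreasing_by
  rw [PySem.Int.floordiv_eq_ediv_of_pos (by omega)]
  omega

-- ===== VERDICT (by name: the statement is the Claim_ definition above) =====
theorem len_ex_spec : Claim_equal_len_ex := by
  intro n _
  show len_ex n = len_ex_alt n
  rw [len_ex, lenExLoop_eq]
  simp [len_ex_alt, altBits]
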